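-- pv_equiv track=rewrite | github.com/frnJJ/CONSULTAS | P2/p7.py | cant
-- ===== SOURCE A (Python) =====
-- def cant (lista,may,min):
--     cant_nochar= 0
--     cant_min= 0
--     cant_may= 0
--     for i in lista:
--         if (i in may):
--             cant_may+= 1
--         elif(i in min):
--             cant_min+= 1
--         else:
--             cant_nochar+= 1
--     return(cant_min,cant_may,cant_nochar)
-- ===== SOURCE B (Python) =====
-- def cant(lista, may, min):
--     freq = {}
--     for i in lista:
--         freq[i] = freq.get(i, 0) + 1
--     cant_may = 0
--     cant_min = 0
--     for k, c in freq.items():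
--         if k in may:
--             cant_may += c
--         elif k in min:
--             cant_min += c
--     return (cant_min, cant_may, len(lista) - cant_may - cant_min)
-- ===== Notes on version B (the rewrite author's own statement) =====
-- stated objective: alternative
-- what changed: B first builds a frequency table of lista and classifies each DISTINCT key once (adding its count), deriving cant_nochar as len(lista) minus the other two, instead of A's element-by-element triple-counter loop.
import Mathlib
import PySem

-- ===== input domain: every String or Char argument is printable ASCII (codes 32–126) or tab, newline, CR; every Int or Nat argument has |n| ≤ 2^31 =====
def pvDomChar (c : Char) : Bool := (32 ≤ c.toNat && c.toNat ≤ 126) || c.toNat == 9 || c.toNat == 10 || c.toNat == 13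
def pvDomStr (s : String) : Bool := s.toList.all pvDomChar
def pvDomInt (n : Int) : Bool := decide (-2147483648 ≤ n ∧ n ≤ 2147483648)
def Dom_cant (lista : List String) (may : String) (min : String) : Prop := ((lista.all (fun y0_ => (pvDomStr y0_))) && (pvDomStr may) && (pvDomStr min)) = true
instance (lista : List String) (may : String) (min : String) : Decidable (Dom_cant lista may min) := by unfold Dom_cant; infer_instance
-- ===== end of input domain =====

-- B builds a frequency table once and classifies each DISTINCT element once, computing
-- cant_nochar as len(lista) minus the other two; A tests every element individually.

-- ===== PORT A =====
-- state = (cant_nochar, cant_min, cant_may), as in A's three counters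
def cant (lista : List String) (may : String) (min : String) : Int × Int × Int :=
  let s := lista.foldl (fun (st : Int × Int × Int) i =>
    if PySem.Str.isIn i may then (st.1, st.2.1, st.2.2 + 1)
    else if PySem.Str.isIn i min then (st.1, st.2.1 + 1, st.2.2)
    else (st.1 + 1, st.2.1, st.2.2)) (0, 0, 0)
  (s.2.1, s.2.2, s.1)

-- ===== PORT B =====
-- freq = manual counting dict; then one pass over its items; state = (cant_may, cant_min)
def cant_alt (lista : List String) (may : String) (min : String) : Int × Int × Int :=
  let freq := lista.foldl (fun d i => d.insert i (d.getD i 0 + 1)) PySem.Dict.empty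
  let p := freq.items.foldl (fun (st : Int × Int) kc =>
    if PySem.Str.isIn kc.1 may then (st.1 + kc.2, st.2)
    else if PySem.Str.isIn kc.1 min then (st.1, st.2 + kc.2)
    else st) (0, 0)
  (p.2, p.1, (lista.length : Int) - p.1 - p.2)

-- ===== PRECONDITION & SPEC =====
def Spec_cant (lista : List String) (may : String) (min : String) (out : Int × Int × Int) : Prop := out = cant_alt lista may min
instance (lista : List String) (may : String) (min : String) (out : Int × Int × Int) : Decidable (Spec_cant lista may min out) := by unfold Spec_cant; infer_instance

-- ===== CLAIM (what is proved, stated in full; the proofs are below) =====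
def Claim_equal_cant : Prop := ∀ (lista : List String) (may : String) (min : String), Dom_cant lista may min → Spec_cant lista may min (cant lista may min)

-- ===== LEMMAS AND PROOFS =====

def pMay (may : String) (i : String) : Bool := PySem.Str.isIn i may
def pMin (may min : String) (i : String) : Bool := !PySem.Str.isIn i may && PySem.Str.isIn i min

-- A's fold computes the three countP's
theorem cant_foldl_char (lista : List String) (may min : String) (st : Int × Int × Int) :
    lista.foldl (fun (st : Int × Int × Int) i =>
      if PySem.Str.isIn i may then (st.1, st.2.1, st.2.2 + 1)
      else if PySem.Str.isIn i min then (st.1, st.2.1 + 1, st.2.2)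
      else (st.1 + 1, st.2.1, st.2.2)) st
    = (st.1 + (lista.countP (fun i => !pMay may i && !pMin may min i) : Int),
       st.2.1 + (lista.countP (pMin may min) : Int),
       st.2.2 + (lista.countP (pMay may) : Int)) := by
  induction lista generalizing st with
  | nil => simp
  | cons a t ih =>
    rw [List.foldl_cons]
    by_cases h1 : PySem.Str.isIn a may <;> by_cases h2 : PySem.Str.isIn a min <;>
      simp only [h1, h2, if_true, if_false, Bool.false_eq_true, ih, List.countP_cons, pMay, pMin,
        Bool.not_true, Bool.not_false, Bool.true_and, Bool.false_and, Bool.and_true, Bool.and_false,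
        Prod.mk.injEq] <;>
      refine ⟨by push_cast; ring, by push_cast; ring, by push_cast; ring⟩

-- B's item fold computes sums of counts over the distinct keys
theorem alt_foldl_char (ks : List String) (xs : List String) (may min : String) (st : Int × Int) :
    (ks.map (fun k => (k, (xs.count k : Int)))).foldl (fun (st : Int × Int) kc =>
      if PySem.Str.isIn kc.1 may then (st.1 + kc.2, st.2)
      else if PySem.Str.isIn kc.1 min then (st.1, st.2 + kc.2)
      else st) st
    = (st.1 + (((ks.filter (pMay may)).map (fun k => xs.count k)).sum : Int),
       st.2 + (((ks.filter (pMin may min)).map (fun k => xs.count k)).sum : Int)) := by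
  induction ks generalizing st with
  | nil => simp
  | cons a t ih =>
    rw [List.map_cons, List.foldl_cons]
    by_cases h1 : PySem.Str.isIn a may <;> by_cases h2 : PySem.Str.isIn a min <;>
      simp only [h1, h2, if_true, if_false, Bool.false_eq_true, ih, List.filter_cons, pMay, pMin,
        Bool.not_true, Bool.not_false, Bool.false_and, Bool.true_and, Bool.and_true,
        Bool.and_false, List.map_cons, List.sum_cons, Prod.mk.injEq, reduceIte] <;>
      refine ⟨by push_cast; try ring, by push_cast; try ring⟩

-- summing counts of distinct keys satisfying p gives countP p (via Mathlib's dedup lemma)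
theorem sum_counts_eq_countP (p : String → Bool) (xs : List String) :
    (((PySem.Set.ofList xs).filter p).map (fun k => xs.count k)).sum = xs.countP p := by
  have hperm : (PySem.Set.ofList xs : List String).Perm xs.dedup := by
    refine (List.perm_ext_iff_of_nodup (PySem.Set.nodup_ofList xs) (List.nodup_dedup xs)).2 ?_
    intro a; simp [PySem.Set.mem_ofList, List.mem_dedup]
  calc (((PySem.Set.ofList xs).filter p).map (fun k => xs.count k)).sum
      = ((xs.dedup.filter p).map (fun k => xs.count k)).sum :=
        List.Perm.sum_eq (List.Perm.map _ (List.Perm.filter p hperm))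
    _ = xs.countP p := List.sum_map_count_dedup_filter_eq_countP p xs

-- each element falls in exactly one of the three classes
theorem countP_split (xs : List String) (may min : String) :
    (xs.countP (pMay may) : Int) + xs.countP (pMin may min)
      + xs.countP (fun i => !pMay may i && !pMin may min i) = xs.length := by
  induction xs with
  | nil => simp
  | cons a t ih =>
    simp only [List.countP_cons, List.length_cons]
    have e1 : pMay may a = PySem.Str.isIn a may := rfl
    have e2 : pMin may min a = (!PySem.Str.isIn a may && PySem.Str.isIn a min) := rfl
    by_cases h1 : PySem.Str.isIn a may <;> by_cases h2 : PySem.Str.isIn a min <;>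
      simp only [e1, e2, h1, h2, Bool.not_true, Bool.not_false, Bool.true_and, Bool.false_and,
        Bool.and_true, Bool.and_false, Bool.and_self, Bool.not_false, if_true, if_false,
        Bool.false_eq_true] <;>
      push_cast <;> omega

-- ===== VERDICT (by name: the statement is the Claim_ definition above) =====
theorem cant_spec : Claim_equal_cant := by
  intro lista may min _
  unfold Spec_cant cant cant_alt
  simp only [PySem.Dict.foldl_insert_getD_add_one_eq_counter, PySem.Dict.items_counter,
    cant_foldl_char, alt_foldl_char, sum_counts_eq_countP, zero_add]
  have h := countP_split lista may min
  refine Prod.ext ?_ (Prod.ext ?_ ?_) <;> simp only [] <;> omega
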